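-- pv_equiv track=rewrite | github.com/Sergey-Tkachenko/yandex_algo_practice | div_B/homework_7/task_A/task_A.py | count_painted
-- ===== SOURCE A (Python) =====
-- def count_painted(events):
--     len_painted = 0
--     balance = -1
--     last_beg = events[0][0]
--     for i in range(len(events) - 1):
--         if events[i + 1][1] == -1:
--             if balance == 0:
--                 last_beg = events[i + 1][0]
--             balance -= 1
--         else:
--             balance += 1
--             if balance == 0:
--                 len_painted += events[i + 1][0] - last_beg
--
--     return len_painted
-- ===== SOURCE B (Python) =====
-- def count_painted(events):
--     # Two staged passes: (1) materialize the coverage-depth array by prefix-summing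
--     # event deltas (first event implicitly a begin, depth starts at 1);
--     # (2) sum every inter-event gap whose left depth is positive.
--     n = len(events)
--     depths = [1] * n
--     for i in range(1, n):
--         depths[i] = depths[i - 1] + (1 if events[i][1] == -1 else -1)
--     return sum(events[i + 1][0] - events[i][0] for i in range(n - 1) if depths[i] > 0)
-- ===== Notes on version B (the rewrite author's own statement) =====
-- stated objective: alternative
-- what changed: A does one sweep keeping a balance counter plus a last_beg coordinate and adds a whole region's length when it closes; B works in two staged passes: it first materializes the coverage-depth array as a prefix sum of event deltas, then sums the inter-event gaps whose depth is positive, with no region bookkeeping at all.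
-- outside the precondition, e.g. on count_painted([(0, 0), (5, -1)]): A returns 0, B returns 5; on count_painted([]): A raises IndexError, B returns 0
import Mathlib
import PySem

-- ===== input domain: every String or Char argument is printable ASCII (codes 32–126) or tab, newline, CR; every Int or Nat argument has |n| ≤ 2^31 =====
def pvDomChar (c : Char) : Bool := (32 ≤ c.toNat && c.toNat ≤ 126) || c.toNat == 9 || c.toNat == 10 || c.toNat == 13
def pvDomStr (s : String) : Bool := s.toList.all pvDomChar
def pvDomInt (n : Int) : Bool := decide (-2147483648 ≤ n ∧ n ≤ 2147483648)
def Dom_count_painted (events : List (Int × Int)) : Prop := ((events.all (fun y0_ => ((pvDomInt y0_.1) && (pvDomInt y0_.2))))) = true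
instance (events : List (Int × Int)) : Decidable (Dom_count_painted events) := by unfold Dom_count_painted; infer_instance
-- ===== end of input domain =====

-- B replaces A's single sweep (balance counter + last_beg, adding a whole region at close)
-- by two staged passes: prefix-sum the event deltas into an explicit depth array, then sum
-- the inter-event gaps whose depth is positive (objective: alternative decomposition, same cost).

-- ===== PORT A =====
-- A's loop state: (len_painted, balance, last_beg)
def count_painted_step (st : Int × Int × Int) (ev : Int × Int) : Int × Int × Int :=
  let lp := st.1; let bal := st.2.1; let lb := st.2.2
  if ev.2 = -1 then
    (lp, bal - 1, if bal = 0 then ev.1 else lb)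
  else
    (if bal + 1 = 0 then lp + (ev.1 - lb) else lp, bal + 1, lb)

def count_painted (events : List (Int × Int)) : Int :=
  match events with
  | [] => 0    -- Python raises IndexError here (excluded by Pre_)
  | (c0, _) :: rest => (rest.foldl count_painted_step (0, -1, c0)).1

-- ===== PORT B =====
-- pass 1 of Source B: depths[i] = depths[i-1] + (1 if events[i][1] == -1 else -1), depths[0] = 1;
-- pvDepthsTail d rest produces depths[1:] given depths[0] = d.
def pvDepthsTail : Int → List (Int × Int) → List Int
  | _, [] => []
  | d, ev :: rest =>
      let d' := d + (if ev.2 = -1 then 1 else -1)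
      d' :: pvDepthsTail d' rest

def count_painted_alt (events : List (Int × Int)) : Int :=
  match events with
  | [] => 0    -- Source B: no gaps, the sum is empty
  | ev0 :: rest =>
    let depths : List Int := 1 :: pvDepthsTail 1 rest
    -- pass 2 of Source B: sum events[i+1][0] - events[i][0] over i < n-1 with depths[i] > 0
    (List.zipWith (fun (g : (Int × Int) × (Int × Int)) (d : Int) =>
        if 0 < d then g.2.1 - g.1.1 else 0)
      ((ev0 :: rest).zip rest) depths).sum

-- ===== PRECONDITION & SPEC =====
def pvDelta (t : Int) : Int := if t = -1 then 1 else -1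

-- coverage depth after the last event of l, the first event counting as a begin
def pvFinalDepth (l : List (Int × Int)) : Int :=
  1 + ((l.drop 1).map (fun e => pvDelta e.2)).sum

-- Pre_ excludes the empty list (A raises IndexError) and event lists whose trailing coverage
-- region never closes (final depth still positive even ignoring the last event): there A
-- silently drops the open region while B counts its covered gaps — both defensible on such
-- malformed (unbalanced) input.
def Pre_count_painted (events : List (Int × Int)) : Prop :=
  events ≠ [] ∧
    (events.length = 1 ∨ pvFinalDepth events ≤ 0 ∨ pvFinalDepth events.dropLast ≤ 0)
instance (events : List (Int × Int)) : Decidable (Pre_count_painted events) := by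
  unfold Pre_count_painted; infer_instance

def pvWitness_count_painted : (List (Int × Int)) := [(1, 0), (4, 1)]

def Spec_count_painted (events : List (Int × Int)) (out : Int) : Prop := out = count_painted_alt events
instance (events : List (Int × Int)) (out : Int) : Decidable (Spec_count_painted events out) := by unfold Spec_count_painted; infer_instance

-- ===== CLAIM (what is proved, stated in full; the proofs are below) =====
def Claim_equal_count_painted : Prop := ∀ (events : List (Int × Int)), Dom_count_painted events → Pre_count_painted events → Spec_count_painted events (count_painted events)

-- ===== LEMMAS AND PROOFS =====

-- per-gap reference value: R prev d l sums, over the events of l, the gap from the previous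
-- coordinate when the coverage depth d (before the event) is positive
def pvR : Int → Int → List (Int × Int) → Int
  | _, _, [] => 0
  | p, d, (c, t) :: rest =>
      (if 0 < d then c - p else 0) + pvR c (d + pvDelta t) rest

-- does the depth drop to ≤ 0 at some event of l, starting from depth d?
def pvLow : Int → List (Int × Int) → Bool
  | _, [] => false
  | d, (_, t) :: rest =>
      let d' := d + pvDelta t
      (d' ≤ 0) || pvLow d' rest

-- the gaps pvR counts but A never pays for: those inside a region that never closes
def pvPend : Int → Int → List (Int × Int) → Int
  | _, _, [] => 0
  | p, d, (c, t) :: rest =>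
      (if 0 < d ∧ pvLow d ((c, t) :: rest) = false then c - p else 0) +
      pvPend c (d + pvDelta t) rest

def pvFin (d : Int) (l : List (Int × Int)) : Int :=
  d + (l.map (fun e => pvDelta e.2)).sum

lemma pvR_cons (p d c t : Int) (l : List (Int × Int)) :
    pvR p d ((c, t) :: l) = (if 0 < d then c - p else 0) + pvR c (d + pvDelta t) l := rfl

lemma pvLow_cons (d c t : Int) (l : List (Int × Int)) :
    pvLow d ((c, t) :: l) = (decide (d + pvDelta t ≤ 0) || pvLow (d + pvDelta t) l) := rfl

lemma pvPend_cons (p d c t : Int) (l : List (Int × Int)) :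
    pvPend p d ((c, t) :: l) =
      (if 0 < d ∧ pvLow d ((c, t) :: l) = false then c - p else 0) +
      pvPend c (d + pvDelta t) l := rfl

lemma pvFin_cons (d : Int) (c t : Int) (l : List (Int × Int)) :
    pvFin d ((c, t) :: l) = pvFin (d + pvDelta t) l := by
  simp [pvFin]; ring

lemma pvLow_of_fin : ∀ (l : List (Int × Int)) (d : Int), l ≠ [] → pvFin d l ≤ 0 →
    pvLow d l = true := by
  intro l
  induction l with
  | nil => intro d h; exact absurd rfl h
  | cons e rest ih =>
    intro d _ hfin
    obtain ⟨c, t⟩ := e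
    rw [pvFin_cons] at hfin
    rw [pvLow_cons, Bool.or_eq_true, decide_eq_true_eq]
    cases rest with
    | nil => left; simpa [pvFin] using hfin
    | cons e2 r2 => right; exact ih _ (by simp) hfin

lemma pvLow_dropLast : ∀ (l : List (Int × Int)) (d : Int),
    pvLow d l.dropLast = true → pvLow d l = true := by
  intro l
  induction l with
  | nil => intro d h; simpa using h
  | cons e rest ih =>
    intro d h
    obtain ⟨c, t⟩ := e
    cases rest with
    | nil => simp [pvLow] at h
    | cons e2 r2 =>
      rw [List.dropLast_cons₂] at h
      rw [pvLow_cons, Bool.or_eq_true] at h ⊢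
      rcases h with h | h
      · exact Or.inl h
      · exact Or.inr (ih _ h)

lemma pvPend_zero : ∀ (l : List (Int × Int)) (p d : Int),
    (l = [] ∨ pvFin d l ≤ 0 ∨ pvFin d l.dropLast ≤ 0) → pvPend p d l = 0 := by
  intro l
  induction l with
  | nil => intro p d _; rfl
  | cons e rest ih
  => intro p d h
     obtain ⟨c, t⟩ := e
     rcases h with h | h | h
     · exact absurd h (by simp)
     · -- final depth ≤ 0: the head gap's region closes, and the hypothesis propagates
       have hlow : pvLow d ((c, t) :: rest) = true :=
         pvLow_of_fin _ d (by simp) h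
       have htail : pvPend c (d + pvDelta t) rest = 0 := by
         cases rest with
         | nil => rfl
         | cons e2 r2 =>
           exact ih c (d + pvDelta t) (Or.inr (Or.inl (by rw [← pvFin_cons]; exact h)))
       rw [pvPend_cons, hlow, htail]
       simp
     · cases rest with
       | nil =>
         -- single event: depth before it is d ≤ 0, so no gap is counted anyway
         simp [pvFin] at h
         rw [pvPend_cons]
         have : ¬ (0 < d) := by omega
         simp [this, pvPend]
       | cons e2 r2 =>
         rw [List.dropLast_cons₂, pvFin_cons] at h
         have htail : pvPend c (d + pvDelta t) (e2 :: r2) = 0 :=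
           ih c (d + pvDelta t) (Or.inr (Or.inr h))
         have hlowd : pvLow d ((c, t) :: e2 :: r2) = true := by
           apply pvLow_dropLast
           rw [List.dropLast_cons₂]
           apply pvLow_of_fin _ d (by simp)
           rw [pvFin_cons]; exact h
         rw [pvPend_cons, hlowd, htail]
         simp

lemma pvLow_ne_nil (d : Int) (l : List (Int × Int)) (h : pvLow d l = true) : l ≠ [] := by
  cases l with
  | nil => simp [pvLow] at h
  | cons a b => simp

-- the combined reference A computes: counted gaps minus pending (never-paid) gaps,
-- and its independence from the previous coordinate except for the head gap
lemma pvRP_shift (l : List (Int × Int)) (p q d : Int) :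
    pvR p d l - pvPend p d l =
      (pvR q d l - pvPend q d l) +
      (if l ≠ [] ∧ 0 < d ∧ pvLow d l = true then q - p else 0) := by
  cases l with
  | nil => simp [pvR, pvPend]
  | cons e rest =>
    obtain ⟨c, t⟩ := e
    rw [pvR_cons, pvR_cons, pvPend_cons, pvPend_cons]
    cases hl : pvLow d ((c, t) :: rest) <;> simp [hl] <;> split_ifs <;> omega

lemma pvA_fold : ∀ (l : List (Int × Int)) (lp bal lb : Int),
    (l.foldl count_painted_step (lp, bal, lb)).1 =
      lp + (pvR lb (-bal) l - pvPend lb (-bal) l) := by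
  intro l
  induction l with
  | nil => intro lp bal lb; simp [pvR, pvPend]
  | cons e rest ih =>
    intro lp bal lb
    obtain ⟨c, t⟩ := e
    by_cases ht : t = -1
    · -- begin event: depth -bal increases by 1
      subst ht
      have hstep : count_painted_step (lp, bal, lb) (c, -1) =
          (lp, bal - 1, if bal = 0 then c else lb) := by
        simp [count_painted_step]
      rw [List.foldl_cons, hstep, ih]
      have hδ : pvDelta (-1) = 1 := by norm_num [pvDelta]
      rw [pvR_cons, pvPend_cons, pvLow_cons, hδ]
      rw [show -(bal - 1) = -bal + 1 by ring]
      rw [pvRP_shift rest (if bal = 0 then c else lb) c (-bal + 1)]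
      cases hl : pvLow (-bal + 1) rest with
      | false => by_cases hb : bal = 0 <;> simp [hl, hb] <;> split_ifs <;> omega
      | true =>
        have hne : rest ≠ [] := pvLow_ne_nil _ _ hl
        by_cases hb : bal = 0 <;> simp [hl, hb, hne] <;> split_ifs <;> omega
    · -- end event: depth -bal decreases by 1; A pays the region when bal + 1 = 0
      have hstep : count_painted_step (lp, bal, lb) (c, t) =
          (if bal + 1 = 0 then lp + (c - lb) else lp, bal + 1, lb) := by
        simp [count_painted_step, ht]
      rw [List.foldl_cons, hstep, ih]
      have hδ : pvDelta t = -1 := by simp [pvDelta, ht]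
      rw [pvR_cons, pvPend_cons, pvLow_cons, hδ]
      rw [show -(bal + 1) = -bal + -1 by ring]
      rw [pvRP_shift rest lb c (-bal + -1)]
      cases hl : pvLow (-bal + -1) rest with
      | false => by_cases hb : bal + 1 = 0 <;> simp [hl, hb] <;> split_ifs <;> omega
      | true =>
        have hne : rest ≠ [] := pvLow_ne_nil _ _ hl
        by_cases hb : bal + 1 = 0 <;> simp [hl, hb, hne] <;> split_ifs <;> omega

lemma pvB_eq : ∀ (rest : List (Int × Int)) (p : Int × Int) (d : Int),
    (List.zipWith (fun (g : (Int × Int) × (Int × Int)) (d : Int) =>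
        if 0 < d then g.2.1 - g.1.1 else 0)
      ((p :: rest).zip rest) (d :: pvDepthsTail d rest)).sum = pvR p.1 d rest := by
  intro rest
  induction rest with
  | nil => intro p d; rfl
  | cons e tl ih =>
    intro p d
    obtain ⟨c, t⟩ := e
    simp only [List.zip_cons_cons, pvDepthsTail, List.zipWith_cons_cons, List.sum_cons]
    rw [ih (c, t) (d + if t = -1 then 1 else -1)]
    simp [pvR_cons, pvDelta]

-- ===== VERDICT (by name: the statement is the Claim_ definition above) =====
theorem count_painted_spec : Claim_equal_count_painted := by
  intro events _ hpre
  unfold Spec_count_painted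
  obtain ⟨hne, hbal⟩ := hpre
  match events with
  | [] => exact absurd rfl hne
  | (c0, t0) :: rest =>
    simp only [count_painted, count_painted_alt]
    rw [pvB_eq rest (c0, t0) 1, pvA_fold]
    have hpend : pvPend c0 1 rest = 0 := by
      apply pvPend_zero
      rcases hbal with h1 | h2 | h3
      · left; cases rest with
        | nil => rfl
        | cons _ _ => simp at h1
      · right; left
        simpa [pvFinalDepth, pvFin] using h2
      · cases rest with
        | nil => exact Or.inl rfl
        | cons e2 r2 =>
          right; right
          rw [List.dropLast_cons₂] at h3
          simpa [pvFinalDepth, pvFin] using h3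
    simp [hpend]
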